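-- pv_equiv track=rewrite | github.com/MRen23/ThesisSysshow_pyqt | Analysis_sys/case_hotel.py | quchong
-- ===== SOURCE A (Python) =====
-- def quchong(frequentItem):
--     result=[]   # 存放官方图片的频繁项集
--     for i in range(0,len(frequentItem)):
--         for j in range(i,len(frequentItem)):
--             if (set(frequentItem[i][0]).issubset(frequentItem[j][0])== True):
--                 if (frequentItem[i][1] == frequentItem[j][1]):
--                     if ((len(frequentItem[i][0])) < (len(frequentItem[j][0]))):
--                         frequentItem[i] = "redundancy"
--     for i in range(0,len(frequentItem)):
--         if frequentItem[i] != "redundancy":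
--             result.append(frequentItem[i])
-- #     print (result)
--     return result
-- ===== SOURCE B (Python) =====
-- def quchong(frequentItem):
--     # Group the original indices by support value (insertion order, ascending
--     # indices), then scan each group's suffixes instead of the full O(n^2)
--     # double scan over all pairs.  Mutates frequentItem in place like the
--     # original (marked slots become the string "redundancy").
--     groups = {}
--     for idx, entry in enumerate(frequentItem):
--         groups.setdefault(entry[1], []).append(idx)
--     redundant = []
--     for idxs in groups.values():
--         rest = idxs
--         while rest:
--             i = rest[0]
--             items = frequentItem[i][0]
--             if any(len(frequentItem[j][0]) > len(items)
--                    and set(items).issubset(frequentItem[j][0]) for j in rest):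
--                 redundant.append(i)
--             rest = rest[1:]
--     for i in redundant:
--         frequentItem[i] = "redundancy"
--     return [e for e in frequentItem if e != "redundancy"]
-- ===== Notes on version B (the rewrite author's own statement) =====
-- stated objective: faster
-- what changed: B builds a dict mapping each support value to its ascending list of indices once and scans for a strictly larger superset only within each support group's suffix, instead of A's full double scan over all index pairs; the in-place 'redundancy' mutation and the j>=i asymmetry are preserved.
import Mathlib
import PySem

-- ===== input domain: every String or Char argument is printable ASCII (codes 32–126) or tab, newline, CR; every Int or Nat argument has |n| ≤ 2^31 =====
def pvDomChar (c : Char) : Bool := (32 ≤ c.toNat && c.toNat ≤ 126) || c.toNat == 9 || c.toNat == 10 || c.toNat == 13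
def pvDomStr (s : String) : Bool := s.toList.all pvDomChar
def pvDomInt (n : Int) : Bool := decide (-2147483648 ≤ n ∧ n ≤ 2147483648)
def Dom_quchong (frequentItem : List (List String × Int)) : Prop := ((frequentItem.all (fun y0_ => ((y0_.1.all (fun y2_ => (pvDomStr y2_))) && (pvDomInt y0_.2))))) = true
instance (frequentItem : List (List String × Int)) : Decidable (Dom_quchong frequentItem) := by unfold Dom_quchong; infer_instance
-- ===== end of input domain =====

-- B groups indices by support once and scans only inside each support group (suffix scan keeps
-- A's "superset at index >= i" asymmetry); equivalence is about the RETURN value — both Pythons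
-- also mutate the argument in place identically (marked slots become the string "redundancy").

-- ===== PORT A =====
-- The Python list cell holds either an original (itemset, support) pair or the string
-- "redundancy"; modelled as Option: none = "redundancy".  This is exact: a marked cell can
-- never be re-marked or matched, since "redundancy"[1] is the character 'e', which Python's
-- `==` never equates with an int support, so the marked branch always falls through (ported
-- as the catch-all `| _, _ => st`).  Loop indices of range(0,n)/range(i,n) are the naturals
-- 0..n-1 / i..n-1, ported as List.range n / List.range' i (n-i); all accesses are in range.
def pvStepA (st : List (Option (List String × Int))) (i j : Nat) :
    List (Option (List String × Int)) :=
  match st.getD i none, st.getD j none with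
  | some ei, some ej =>
      -- set(frequentItem[i][0]).issubset(frequentItem[j][0]) ⇔ every element occurs in the other list (exact)
      if ei.1.all (fun a => ej.1.contains a) then
        if ei.2 == ej.2 then
          if ei.1.length < ej.1.length then st.set i none else st
        else st
      else st
  | _, _ => st

def quchong (frequentItem : List (List String × Int)) : List (List String × Int) :=
  let n := frequentItem.length
  let st := (List.range n).foldl
    (fun st i => (List.range' i (n - i)).foldl (fun st j => pvStepA st i j) st)
    (frequentItem.map some)
  -- second loop: append every cell that is not "redundancy"
  st.foldl (fun res o => match o with | some e => res ++ [e] | none => res) []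

-- ===== PORT B =====
-- helper: the `any(...)` generator body — len(frequentItem[j][0]) > len(items) and set(items).issubset(frequentItem[j][0])
def pvCheck (frequentItem : List (List String × Int)) (items : List String) (j : Nat) : Bool :=
  decide (items.length < (frequentItem.getD j ([], 0)).1.length) &&
    items.all (fun a => (frequentItem.getD j ([], 0)).1.contains a)

-- helper: the `while rest:` suffix loop over one support group, threading the redundant accumulator
def pvScanGroup (frequentItem : List (List String × Int)) (rest redundant : List Nat) :
    List Nat :=
  match rest with
  | [] => redundant
  | i :: rest' =>
      pvScanGroup frequentItem rest'
        (if (i :: rest').any (pvCheck frequentItem ((frequentItem.getD i ([], 0)).1))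
         then redundant ++ [i] else redundant)

def quchong_alt (frequentItem : List (List String × Int)) : List (List String × Int) :=
  -- groups.setdefault(entry[1], []).append(idx) over enumerate(frequentItem)
  let groups := (List.range frequentItem.length).foldl
    (fun d idx => d.modify (frequentItem.getD idx ([], 0)).2 [] (· ++ [idx]))
    (PySem.Dict.empty : PySem.Dict Int (List Nat))
  let redundant := groups.values.foldl
    (fun acc idxs => pvScanGroup frequentItem idxs acc) []
  -- for i in redundant: frequentItem[i] = "redundancy"  (none = "redundancy", as in port A)
  let st := redundant.foldl (fun st i => st.set i none) (frequentItem.map some)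
  -- [e for e in frequentItem if e != "redundancy"]
  st.filterMap id

-- ===== PRECONDITION & SPEC =====
def Spec_quchong (frequentItem : List (List String × Int)) (out : List (List String × Int)) : Prop := out = quchong_alt frequentItem
instance (frequentItem : List (List String × Int)) (out : List (List String × Int)) : Decidable (Spec_quchong frequentItem out) := by unfold Spec_quchong; infer_instance

-- ===== CLAIM (what is proved, stated in full; the proofs are below) =====
def Claim_equal_quchong : Prop := ∀ (frequentItem : List (List String × Int)), Dom_quchong frequentItem → Spec_quchong frequentItem (quchong frequentItem)

-- ===== LEMMAS AND PROOFS =====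

-- the pair-redundancy condition on original entries, in A's order
def pvCond (e g : List String × Int) : Bool :=
  e.1.all (fun a => g.1.contains a) && e.2 == g.2 && decide (e.1.length < g.1.length)

-- index i of f is redundant: some j ≥ i has equal support and a strictly larger superset
def pvRed (f : List (List String × Int)) (i : Nat) : Bool :=
  (f.drop i).any (fun g => pvCond (f.getD i ([], 0)) g)

-- the common final state of the mutated list
def pvMask (f : List (List String × Int)) : List (Option (List String × Int)) :=
  (List.range f.length).map (fun i => if pvRed f i then none else some (f.getD i ([], 0)))

-- ---------- generic list facts ----------
theorem pv_getD_eq (l : List (Option (List String × Int))) (m : Nat) :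
    l.getD m none = (l[m]?).getD none := List.getD_eq_getElem?_getD

theorem pv_getD_set_self (l : List (Option (List String × Int))) (i : Nat) (h : i < l.length) :
    (l.set i none).getD i none = none := by
  rw [pv_getD_eq, List.getElem?_set_self (by simpa using h)]
  simp

theorem pv_getD_set (l : List (Option (List String × Int))) (i m : Nat) :
    (l.set i none).getD m none =
      if m = i ∧ i < l.length then none else l.getD m none := by
  rw [pv_getD_eq, pv_getD_eq, List.getElem?_set]
  by_cases h1 : i = m
  · subst h1
    by_cases h2 : i < l.length <;> simp [h2]
  · rw [if_neg h1, if_neg (fun h => h1 h.1.symm)]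

theorem pv_getD_map_some (f : List (List String × Int)) (j : Nat) (hj : j < f.length) :
    (f.map some).getD j none = some (f.getD j ([], 0)) := by
  rw [pv_getD_eq, List.getElem?_map, List.getElem?_eq_getElem hj]
  simp [List.getD_eq_getElem?_getD, List.getElem?_eq_getElem hj]

-- ---------- A: step characterisation ----------
theorem pvStepA_none (st : List (Option (List String × Int))) (i j : Nat)
    (h : st.getD i none = none) : pvStepA st i j = st := by
  unfold pvStepA; rw [h]

theorem pv_foldl_stepA_none (js : List Nat) (st : List (Option (List String × Int))) (i : Nat)
    (h : st.getD i none = none) :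
    js.foldl (fun st j => pvStepA st i j) st = st := by
  induction js with
  | nil => rfl
  | cons j js ih => simp only [List.foldl_cons, pvStepA_none st i j h]; exact ih

theorem pvStepA_some (st : List (Option (List String × Int))) (i j : Nat)
    (e g : List String × Int) (hi : st.getD i none = some e) (hj : st.getD j none = some g) :
    pvStepA st i j = if pvCond e g then st.set i none else st := by
  unfold pvStepA pvCond; rw [hi, hj]
  by_cases h1 : e.1.all (fun a => g.1.contains a) <;>
    by_cases h2 : e.2 == g.2 <;>
      by_cases h3 : e.1.length < g.1.length <;>
        simp [h1, h2, h3]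

theorem pv_length_stepA (st : List (Option (List String × Int))) (i j : Nat) :
    (pvStepA st i j).length = st.length := by
  unfold pvStepA
  rcases st.getD i none with _ | ei
  · rfl
  · rcases st.getD j none with _ | ej
    · rfl
    · dsimp only
      split_ifs <;> simp

theorem pv_length_foldl_stepA (js : List Nat) (st : List (Option (List String × Int))) (i : Nat) :
    (js.foldl (fun st j => pvStepA st i j) st).length = st.length := by
  induction js generalizing st with
  | nil => rfl
  | cons j js ih => simp only [List.foldl_cons]; rw [ih, pv_length_stepA]

theorem pv_length_foldl_outer (is : List Nat) (g : Nat → List Nat)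
    (st : List (Option (List String × Int))) :
    (is.foldl (fun st i => (g i).foldl (fun st j => pvStepA st i j) st) st).length =
      st.length := by
  induction is generalizing st with
  | nil => rfl
  | cons i is ih => simp only [List.foldl_cons]; rw [ih, pv_length_foldl_stepA]

theorem pv_innerA_char (f : List (List String × Int)) (js : List Nat)
    (st : List (Option (List String × Int))) (i : Nat) (e : List String × Int)
    (hi : st.getD i none = some e)
    (hj : ∀ j ∈ js, st.getD j none = some (f.getD j ([], 0))) :
    js.foldl (fun st j => pvStepA st i j) st =
      if js.any (fun j => pvCond e (f.getD j ([], 0))) then st.set i none else st := by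
  induction js generalizing st with
  | nil => simp
  | cons j js ih =>
    have hjj : st.getD j none = some (f.getD j ([], 0)) := hj j (by simp)
    have hilt : i < st.length := by
      by_contra hge
      rw [List.getD_eq_default _ _ (by omega)] at hi; simp at hi
    simp only [List.foldl_cons, pvStepA_some st i j e _ hi hjj]
    by_cases hc : pvCond e (f.getD j ([], 0)) = true
    · rw [if_pos hc, pv_foldl_stepA_none js _ i (pv_getD_set_self st i hilt)]
      rw [List.any_cons, hc, Bool.true_or, if_pos rfl]
    · rw [if_neg hc, ih st hi (fun j' hj' => hj j' (by simp [hj']))]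
      rw [Bool.not_eq_true] at hc
      rw [List.any_cons, hc, Bool.false_or]

theorem pv_any_range' (f : List (List String × Int)) (p : (List String × Int) → Bool) :
    ∀ (c k : Nat), f.length - k = c →
      ((List.range' k c).any (fun j => p (f.getD j ([], 0))) = (f.drop k).any p) := by
  intro c
  induction c with
  | zero =>
    intro k hk
    rw [List.drop_eq_nil_of_le (by omega)]
    rfl
  | succ m ih =>
    intro k hk
    have hkl : k < f.length := by omega
    rw [List.range'_succ, List.drop_eq_getElem_cons hkl]
    simp only [List.any_cons]
    rw [ih (k + 1) (by omega), List.getD_eq_getElem _ _ hkl]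

theorem pv_outerA_char (f : List (List String × Int)) :
    ∀ (K : Nat), K ≤ f.length →
      ∀ (m : Nat),
        ((List.range K).foldl
            (fun st i => (List.range' i (f.length - i)).foldl (fun st j => pvStepA st i j) st)
            (f.map some)).getD m none =
          if m < K ∧ pvRed f m then none else (f.map some).getD m none := by
  intro K
  induction K with
  | zero => intro _ m; simp
  | succ K ih =>
    intro hK m
    have hKlt : K < f.length := by omega
    set stK := (List.range K).foldl
        (fun st i => (List.range' i (f.length - i)).foldl (fun st j => pvStepA st i j) st)
        (f.map some) with hstK
    have hlen : stK.length = f.length := by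
      rw [hstK, pv_length_foldl_outer]; simp
    have hih := ih (by omega)
    have hinner :
        (List.range' K (f.length - K)).foldl (fun st j => pvStepA st K j) stK =
          if pvRed f K then stK.set K none else stK := by
      rw [pv_innerA_char f _ stK K (f.getD K ([], 0))
        (by rw [hih K, if_neg (fun h => Nat.lt_irrefl K h.1)]; exact pv_getD_map_some f K hKlt)
        (by
          intro j hjmem
          rw [List.mem_range'_1] at hjmem
          rw [hih j, if_neg (by omega)]
          exact pv_getD_map_some f j (by omega))]
      rw [pv_any_range' f _ (f.length - K) K rfl]
      rfl
    rw [List.range_succ, List.foldl_append, List.foldl_cons, List.foldl_nil, ← hstK, hinner]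
    by_cases hr : pvRed f K = true
    · rw [if_pos hr, pv_getD_set, hlen, hih m]
      by_cases hmK : m = K
      · subst hmK; simp [hKlt, hr, Nat.lt_irrefl]
      · have : ¬ (m = K ∧ K < f.length) := fun h => hmK h.1
        rw [if_neg this]
        by_cases hm : m < K ∧ pvRed f m = true
        · rw [if_pos hm, if_pos ⟨by omega, hm.2⟩]
        · rw [if_neg hm, if_neg (by
            rintro ⟨h1, h2⟩
            exact hm ⟨by omega, h2⟩)]
    · rw [if_neg hr, hih m]
      by_cases hm : m < K ∧ pvRed f m = true
      · rw [if_pos hm, if_pos ⟨by omega, hm.2⟩]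
      · rw [if_neg hm, if_neg (by
          rintro ⟨h1, h2⟩
          rcases Nat.lt_succ_iff_lt_or_eq.mp h1 with h | h
          · exact hm ⟨h, h2⟩
          · subst h; exact hr h2)]

theorem pv_collect_eq_filterMap (l : List (Option (List String × Int)))
    (acc : List (List String × Int)) :
    l.foldl (fun res o => match o with | some e => res ++ [e] | none => res) acc =
      acc ++ l.filterMap id := by
  induction l generalizing acc with
  | nil => simp
  | cons o l ih =>
    rcases o with _ | e <;> simp [ih]

theorem quchong_eq_mask (f : List (List String × Int)) :
    quchong f = (pvMask f).filterMap id := by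
  unfold quchong
  rw [pv_collect_eq_filterMap, List.nil_append]
  congr 1
  set stN := (List.range f.length).foldl
      (fun st i => (List.range' i (f.length - i)).foldl (fun st j => pvStepA st i j) st)
      (f.map some) with hstN
  have hlen : stN.length = f.length := by rw [hstN, pv_length_foldl_outer]; simp
  apply List.ext_getElem
  · rw [hlen]; simp [pvMask]
  · intro m hm hm2
    have hmf : m < f.length := by omega
    have hgd := pv_outerA_char f f.length (le_refl _) m
    rw [← hstN] at hgd
    have : stN.getD m none = stN[m] := by
      rw [pv_getD_eq, List.getElem?_eq_getElem hm]; rfl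
    rw [← this, hgd, pv_getD_map_some f m hmf]
    simp only [pvMask, List.getElem_map, List.getElem_range]
    by_cases hr : pvRed f m = true <;> simp [hr, hmf]

-- ---------- B: group scan characterisation ----------
theorem pv_scanGroup_acc (f : List (List String × Int)) (rest acc : List Nat) :
    pvScanGroup f rest acc = acc ++ pvScanGroup f rest [] := by
  induction rest generalizing acc with
  | nil => simp [pvScanGroup]
  | cons i rest ih =>
    rw [pvScanGroup, pvScanGroup]
    by_cases hc : (i :: rest).any (pvCheck f ((f.getD i ([], 0)).1)) = true
    · rw [if_pos hc, if_pos hc, ih (acc ++ [i]), ih ([] ++ [i])]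
      simp
    · rw [if_neg hc, if_neg hc, ih acc]

theorem pv_scanGroup_subset (f : List (List String × Int)) (rest : List Nat) (m : Nat)
    (h : m ∈ pvScanGroup f rest []) : m ∈ rest := by
  induction rest with
  | nil => simpa [pvScanGroup] using h
  | cons i rest ih =>
    rw [pvScanGroup, pv_scanGroup_acc] at h
    rcases List.mem_append.mp h with h1 | h2
    · split_ifs at h1 <;> simp_all
    · exact List.mem_cons_of_mem i (ih h2)

theorem pv_scanGroup_mem (f : List (List String × Int)) (rest : List Nat) (m : Nat)
    (hp : rest.Pairwise (· < ·)) (hm : m ∈ rest) :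
    (m ∈ pvScanGroup f rest [] ↔
      ∃ j ∈ rest, m ≤ j ∧ pvCheck f ((f.getD m ([], 0)).1) j = true) := by
  induction rest with
  | nil => cases hm
  | cons i rest ih =>
    rw [pvScanGroup, pv_scanGroup_acc]
    rcases List.pairwise_cons.mp hp with ⟨hlt, hp'⟩
    rcases List.mem_cons.mp hm with hmi | hmr
    · subst hmi
      have hnot : m ∉ pvScanGroup f rest [] := fun h =>
        Nat.lt_irrefl m (hlt m (pv_scanGroup_subset f rest m h))
      constructor
      · intro h
        rcases List.mem_append.mp h with h1 | h2
        · have hc : (m :: rest).any (pvCheck f ((f.getD m ([], 0)).1)) = true := by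
            by_contra hc; rw [if_neg hc] at h1; cases h1
          rcases List.any_eq_true.mp hc with ⟨j, hjm, hcj⟩
          exact ⟨j, hjm, by
            rcases List.mem_cons.mp hjm with h | h
            · omega
            · exact Nat.le_of_lt (hlt j h), hcj⟩
        · exact absurd h2 hnot
      · rintro ⟨j, hjm, _, hcj⟩
        have hc : (m :: rest).any (pvCheck f ((f.getD m ([], 0)).1)) = true :=
          List.any_eq_true.mpr ⟨j, hjm, hcj⟩
        rw [if_pos hc]
        simp
    · have hmi : m ≠ i := fun h => Nat.lt_irrefl m (h ▸ hlt m hmr)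
      constructor
      · intro h
        rcases List.mem_append.mp h with h1 | h2
        · split_ifs at h1 <;> simp_all
        · rcases (ih hp' hmr).mp h2 with ⟨j, hjm, hle, hcj⟩
          exact ⟨j, List.mem_cons_of_mem i hjm, hle, hcj⟩
      · rintro ⟨j, hjm, hle, hcj⟩
        rcases List.mem_cons.mp hjm with hji | hjr
        · subst hji
          exact absurd (Nat.lt_of_lt_of_le (hlt m hmr) hle) (Nat.lt_irrefl j)
        · refine List.mem_append.mpr (Or.inr ((ih hp' hmr).mpr ⟨j, hjr, hle, hcj⟩))

theorem pv_foldl_scan_flatMap (f : List (List String × Int)) (ls : List (List Nat)) :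
    ∀ acc, ls.foldl (fun acc idxs => pvScanGroup f idxs acc) acc =
      acc ++ ls.flatMap (fun idxs => pvScanGroup f idxs []) := by
  induction ls with
  | nil => intro acc; simp
  | cons idxs ls ih =>
    intro acc
    rw [List.foldl_cons, pv_scanGroup_acc, ih]
    simp

-- the grouping dict: value at v is the ascending list of indices with support v
theorem pv_groups_getD (f : List (List String × Int)) (v : Int) :
    (((List.range f.length).foldl
        (fun d idx => d.modify (f.getD idx ([], 0)).2 [] (· ++ [idx]))
        (PySem.Dict.empty : PySem.Dict Int (List Nat))).getD v []) =
      (List.range f.length).filter (fun i => (f.getD i ([], 0)).2 == v) := by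
  rw [show ((List.range f.length).foldl
        (fun d idx => d.modify (f.getD idx ([], 0)).2 [] (· ++ [idx]))
        (PySem.Dict.empty : PySem.Dict Int (List Nat))) =
      (((List.range f.length).map (fun i => ((f.getD i ([], 0)).2, i))).foldl
        (fun d p => d.modify p.1 [] (· ++ [p.2]))
        (PySem.Dict.empty : PySem.Dict Int (List Nat))) from
      (List.foldl_map (f := fun i => ((f.getD i ([], 0)).2, i))
        (g := fun d p => d.modify p.1 [] (· ++ [p.2]))
        (l := List.range f.length) (init := PySem.Dict.empty)).symm]
  rw [PySem.Dict.getD_foldl_modify_append]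
  rw [PySem.Dict.getD_empty, List.nil_append, List.filter_map, List.map_map]
  simp [Function.comp_def]

theorem pv_groups_nodup_keys (f : List (List String × Int)) :
    ((List.range f.length).foldl
        (fun d idx => d.modify (f.getD idx ([], 0)).2 [] (· ++ [idx]))
        (PySem.Dict.empty : PySem.Dict Int (List Nat))).keys.Nodup := by
  exact PySem.Dict.nodup_keys_foldl_modify_key (List.range f.length)
    (fun idx => (f.getD idx ([], 0)).2) [] (fun _ idx => (· ++ [idx])) _
    (by simp [PySem.Dict.keys_empty])

theorem pv_values_eq_map_keys {κ ν : Type} [BEq κ] [LawfulBEq κ]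
    (d : PySem.Dict κ ν) (h : d.keys.Nodup) (d0 : ν) :
    d.values = d.keys.map (fun k => d.getD k d0) := by
  simp only [PySem.Dict.values, PySem.Dict.keys, List.map_map]
  apply List.map_congr_left
  intro p hp
  exact (PySem.Dict.getD_of_mem_items d (by exact hp) h d0).symm

-- membership in B's redundant list ⇔ a later equal-support strict superset exists
theorem pv_mem_redundant (f : List (List String × Int)) (m : Nat) :
    (m ∈ (((List.range f.length).foldl
        (fun d idx => d.modify (f.getD idx ([], 0)).2 [] (· ++ [idx]))
        (PySem.Dict.empty : PySem.Dict Int (List Nat))).values.foldl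
          (fun acc idxs => pvScanGroup f idxs acc) []) ↔
      ∃ j : Nat, m ≤ j ∧ j < f.length ∧
        pvCond (f.getD m ([], 0)) (f.getD j ([], 0)) = true) := by
  set groups := ((List.range f.length).foldl
      (fun d idx => d.modify (f.getD idx ([], 0)).2 [] (· ++ [idx]))
      (PySem.Dict.empty : PySem.Dict Int (List Nat))) with hgroups
  have hnd := pv_groups_nodup_keys f
  rw [← hgroups] at hnd
  have hvals : groups.values = groups.keys.map (fun k => groups.getD k []) :=
    pv_values_eq_map_keys groups hnd []
  have hgd : ∀ v, groups.getD v [] =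
      (List.range f.length).filter (fun i => (f.getD i ([], 0)).2 == v) := by
    intro v; rw [hgroups]; exact pv_groups_getD f v
  have hpair : ∀ v, (groups.getD v []).Pairwise (· < ·) := by
    intro v; rw [hgd v]
    exact (List.pairwise_lt_range).filter _
  have hmemg : ∀ v i, i ∈ groups.getD v [] ↔ i < f.length ∧ (f.getD i ([], 0)).2 = v := by
    intro v i
    rw [hgd v, List.mem_filter, List.mem_range]
    simp
  rw [pv_foldl_scan_flatMap f _ [], List.nil_append, List.mem_flatMap]
  constructor
  · rintro ⟨idxs, hidxs, hmem⟩
    rw [hvals, List.mem_map] at hidxs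
    rcases hidxs with ⟨v, hv, rfl⟩
    have hmidx := pv_scanGroup_subset f _ m hmem
    rcases (hmemg v m).mp hmidx with ⟨hmn, hkey⟩
    rcases (pv_scanGroup_mem f _ m (hpair v) hmidx).mp hmem with ⟨j, hjm, hle, hcj⟩
    rcases (hmemg v j).mp hjm with ⟨hjn, hkeyj⟩
    refine ⟨j, hle, hjn, ?_⟩
    unfold pvCond
    unfold pvCheck at hcj
    rw [Bool.and_eq_true] at hcj
    rw [Bool.and_eq_true, Bool.and_eq_true]
    exact ⟨⟨hcj.2, by rw [hkey, hkeyj]; simp⟩, hcj.1⟩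
  · rintro ⟨j, hle, hjn, hcond⟩
    have hmn : m < f.length := by omega
    unfold pvCond at hcond
    rw [Bool.and_eq_true, Bool.and_eq_true] at hcond
    have hkeyeq : (f.getD m ([], 0)).2 = (f.getD j ([], 0)).2 := by
      have := hcond.1.2; simpa using this
    set v := (f.getD m ([], 0)).2 with hv
    have hmidx : m ∈ groups.getD v [] := (hmemg v m).mpr ⟨hmn, rfl⟩
    have hjidx : j ∈ groups.getD v [] := (hmemg v j).mpr ⟨hjn, hkeyeq.symm⟩
    have hvk : v ∈ groups.keys := by
      by_contra hvk
      have hcont : groups.contains v = false := by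
        rcases Bool.eq_false_or_eq_true (groups.contains v) with h | h
        · exact absurd ((PySem.Dict.contains_iff_mem_keys groups v).mp h) hvk
        · exact h
      rw [PySem.Dict.getD_of_not_contains groups [] hcont] at hmidx
      cases hmidx
    refine ⟨groups.getD v [], ?_, ?_⟩
    · rw [hvals]; exact List.mem_map.mpr ⟨v, hvk, rfl⟩
    · refine (pv_scanGroup_mem f _ m (hpair v) hmidx).mpr
        ⟨j, hjidx, hle, ?_⟩
      unfold pvCheck
      rw [Bool.and_eq_true]
      exact ⟨hcond.2, hcond.1.1⟩

theorem pv_red_iff (f : List (List String × Int)) (m : Nat) :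
    (pvRed f m = true ↔
      ∃ j : Nat, m ≤ j ∧ j < f.length ∧
        pvCond (f.getD m ([], 0)) (f.getD j ([], 0)) = true) := by
  unfold pvRed
  rw [List.any_eq_true]
  constructor
  · rintro ⟨g, hg, hc⟩
    rcases List.mem_iff_getElem.mp hg with ⟨k, hk, rfl⟩
    rw [List.getElem_drop] at hc
    have hk' : m + k < f.length := by
      have := hk; rw [List.length_drop] at this; omega
    exact ⟨m + k, by omega, hk', by
      rwa [List.getD_eq_getElem _ _ hk']⟩
  · rintro ⟨j, hle, hjn, hc⟩
    refine ⟨f[j], ?_, by rwa [List.getD_eq_getElem _ _ hjn] at hc⟩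
    rcases Nat.exists_eq_add_of_le hle with ⟨k, rfl⟩
    exact List.mem_iff_getElem.mpr ⟨k, by rw [List.length_drop]; omega,
      by rw [List.getElem_drop]⟩

-- the marking loop of B, pointwise
theorem pv_foldl_set_getD (l : List Nat) :
    ∀ (st : List (Option (List String × Int))) (m : Nat),
      (l.foldl (fun s i => s.set i none) st).getD m none =
        if m ∈ l ∧ m < st.length then none else st.getD m none := by
  induction l with
  | nil => intro st m; simp
  | cons i l ih =>
    intro st m
    rw [List.foldl_cons, ih, pv_getD_set]
    by_cases h1 : m ∈ l ∧ m < (st.set i none).length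
    · rw [if_pos h1, if_pos ⟨List.mem_cons_of_mem i h1.1, by simpa using h1.2⟩]
    · rw [if_neg h1]
      by_cases h2 : m = i ∧ i < st.length
      · rw [if_pos h2, if_pos ⟨by simp [h2.1], by omega⟩]
      · rw [if_neg h2, if_neg (by
          rintro ⟨hm, hlt⟩
          rcases List.mem_cons.mp hm with h | h
          · exact h2 ⟨h, by omega⟩
          · exact h1 ⟨h, by simpa using hlt⟩)]

theorem pv_length_foldl_set (l : List Nat) :
    ∀ (st : List (Option (List String × Int))),
      (l.foldl (fun s i => s.set i none) st).length = st.length := by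
  induction l with
  | nil => intro st; rfl
  | cons i l ih => intro st; rw [List.foldl_cons, ih]; simp

theorem quchong_alt_eq_mask (f : List (List String × Int)) :
    quchong_alt f = (pvMask f).filterMap id := by
  unfold quchong_alt
  dsimp only
  congr 1
  set red := (((List.range f.length).foldl
      (fun d idx => d.modify (f.getD idx ([], 0)).2 [] (· ++ [idx]))
      (PySem.Dict.empty : PySem.Dict Int (List Nat))).values.foldl
        (fun acc idxs => pvScanGroup f idxs acc) []) with hred
  show (red.foldl (fun st i => st.set i none) (f.map some)) = pvMask f
  have hlen : (red.foldl (fun st i => st.set i none) (f.map some)).length = f.length := by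
    rw [pv_length_foldl_set]; simp
  apply List.ext_getElem
  · rw [hlen]; simp [pvMask]
  · intro m hm hm2
    have hmf : m < f.length := by omega
    have hgd := pv_foldl_set_getD red (f.map some) m
    have hlm : (red.foldl (fun st i => st.set i none) (f.map some)).getD m none =
        (red.foldl (fun st i => st.set i none) (f.map some))[m] := by
      rw [pv_getD_eq, List.getElem?_eq_getElem hm]; rfl
    rw [← hlm, hgd, pv_getD_map_some f m hmf]
    simp only [pvMask, List.getElem_map, List.getElem_range]
    by_cases hr : pvRed f m = true
    · rw [if_pos ⟨(pv_mem_redundant f m).mpr ((pv_red_iff f m).mp hr), by simpa using hmf⟩,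
        if_pos hr]
    · rw [if_neg (by
        rintro ⟨hmem, _⟩
        exact hr ((pv_red_iff f m).mpr ((pv_mem_redundant f m).mp hmem))), if_neg hr]

-- ===== VERDICT (by name: the statement is the Claim_ definition above) =====
theorem quchong_spec : Claim_equal_quchong := by
  intro f _
  unfold Spec_quchong
  rw [quchong_eq_mask, quchong_alt_eq_mask]
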